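-- pv_equiv track=rewrite | github.com/Mikububu/visionaries-in-exile | tools/decode_bitd.py | guess_dims_by_factoring
-- ===== SOURCE A (Python) =====
-- def guess_dims_by_factoring(decoded_size: int, bpp: int = 8) -> tuple[int, int]:
--     """Fallback when CASt parse fails.
--
--     Strategy: find all exact divisor pairs (w, h) with sane aspect/size and
--     pick the width closest to a typical Director stage (640 / 480 / 512 / 320).
--     """
--     bytes_per_px = max(1, bpp // 8)
--     cap = decoded_size // bytes_per_px
--     if cap <= 0:
--         return 640, 1
--
--     # Collect all (w, h) pairs where w * h == cap and both are in sane range.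
--     pairs: list[tuple[int, int]] = []
--     w = 16
--     while w <= 1600:
--         if cap % w == 0:
--             h = cap // w
--             if 8 <= h <= 2048:
--                 pairs.append((w, h))
--         w += 1
--
--     # Prefer: widest factor in the stage-friendly band [160, 720]; then fall
--     # back to anything reasonable. This handles both 640x480 full screens and
--     # non-standard cropped bitmaps like 598x444.
--     band = [p for p in pairs if 160 <= p[0] <= 640 and 40 <= p[1] <= 640]
--     if band:
--         band.sort(key=lambda p: (-p[0], p[1]))  # widest first
--         return band[0]
--     if pairs:
--         pairs.sort(key=lambda p: (-p[0], p[1]))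
--         return pairs[0]
--
--     # No exact factoring: fall back to 640 with truncation.
--     return 640, max(1, decoded_size // 640)
-- ===== SOURCE B (Python) =====
-- def guess_dims_by_factoring(decoded_size: int, bpp: int = 8) -> tuple[int, int]:
--     """Factor decoded_size into a plausible (width, height).
--
--     Instead of collecting every divisor pair and sorting, scan widths
--     downwards and return the first hit: widest stage-friendly width first,
--     then widest generally-sane width, then the 640-wide fallback.
--     """
--     cap = decoded_size // max(1, bpp // 8)
--     if cap <= 0:
--         return 640, 1
--     for w in range(640, 159, -1):
--         if cap % w == 0 and 40 <= cap // w <= 640: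
--             return w, cap // w
--     for w in range(1600, 15, -1):
--         if cap % w == 0 and 8 <= cap // w <= 2048:
--             return w, cap // w
--     return 640, max(1, decoded_size // 640)
-- ===== Notes on version B (the rewrite author's own statement) =====
-- stated objective: simpler
-- what changed: Replaced the build-all-pairs + band-filter + sort-by-(-w,h) + take-first pipeline with two early-returning descending width scans (stage band 640..160 first, then 1600..16), eliminating the pair list and the sorts.
import Mathlib
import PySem

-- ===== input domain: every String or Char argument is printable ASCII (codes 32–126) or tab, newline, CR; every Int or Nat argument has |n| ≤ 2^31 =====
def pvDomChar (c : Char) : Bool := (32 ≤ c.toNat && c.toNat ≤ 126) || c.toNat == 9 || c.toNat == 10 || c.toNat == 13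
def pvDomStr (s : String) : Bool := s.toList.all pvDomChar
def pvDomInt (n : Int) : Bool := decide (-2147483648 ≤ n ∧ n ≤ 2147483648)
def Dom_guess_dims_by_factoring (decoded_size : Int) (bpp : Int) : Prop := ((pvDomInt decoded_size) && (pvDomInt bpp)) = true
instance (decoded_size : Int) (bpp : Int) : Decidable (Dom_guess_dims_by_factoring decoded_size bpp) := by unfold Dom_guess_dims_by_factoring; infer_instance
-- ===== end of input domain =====

-- B replaces A's collect-all-pairs + band-filter + sort pipeline by two
-- early-returning descending width scans (simpler: no pair list, no sort).

-- ===== PORT A =====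
-- the 'w = 16; while w <= 1600' collection loop of A
def pvPairsA (cap : Int) : List (Int × Int) :=
  (PySem.List.pyRange 16 1601 1).foldl (fun acc w =>
    if PySem.Int.mod cap w = 0 then
      let h := PySem.Int.floordiv cap w
      if 8 ≤ h ∧ h ≤ 2048 then acc ++ [(w, h)] else acc
    else acc) []

def guess_dims_by_factoring (decoded_size : Int) (bpp : Int) : Int × Int :=
  let bytes_per_px := max 1 (PySem.Int.floordiv bpp 8)
  let cap := PySem.Int.floordiv decoded_size bytes_per_px
  if cap ≤ 0 then (640, 1)
  else
    let pairs := pvPairsA cap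
    let band := pairs.filter (fun p => decide (160 ≤ p.1 ∧ p.1 ≤ 640 ∧ 40 ≤ p.2 ∧ p.2 ≤ 640))
    if band ≠ [] then
      (PySem.List.sorted2 band (fun p => -p.1) (fun p => p.2)).headD (0, 0)
    else if pairs ≠ [] then
      (PySem.List.sorted2 pairs (fun p => -p.1) (fun p => p.2)).headD (0, 0)
    else (640, max 1 (PySem.Int.floordiv decoded_size 640))

-- ===== PORT B =====
-- one descending 'for w in range(…, …, -1)' scan of B, early return on first hit
def pvScanB (cap : Int) (lo hi : Int) : List Int → Option (Int × Int)
  | [] => none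
  | w :: ws =>
    if PySem.Int.mod cap w = 0 ∧ lo ≤ PySem.Int.floordiv cap w ∧ PySem.Int.floordiv cap w ≤ hi then
      some (w, PySem.Int.floordiv cap w)
    else pvScanB cap lo hi ws

def guess_dims_by_factoring_alt (decoded_size : Int) (bpp : Int) : Int × Int :=
  let cap := PySem.Int.floordiv decoded_size (max 1 (PySem.Int.floordiv bpp 8))
  if cap ≤ 0 then (640, 1)
  else
    match pvScanB cap 40 640 (PySem.List.pyRange 640 159 (-1)) with
    | some p => p
    | none =>
      match pvScanB cap 8 2048 (PySem.List.pyRange 1600 15 (-1)) with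
      | some p => p
      | none => (640, max 1 (PySem.Int.floordiv decoded_size 640))

-- ===== PRECONDITION & SPEC =====
def Spec_guess_dims_by_factoring (decoded_size : Int) (bpp : Int) (out : Int × Int) : Prop := out = guess_dims_by_factoring_alt decoded_size bpp
instance (decoded_size : Int) (bpp : Int) (out : Int × Int) : Decidable (Spec_guess_dims_by_factoring decoded_size bpp out) := by unfold Spec_guess_dims_by_factoring; infer_instance

-- ===== CLAIM (what is proved, stated in full; the proofs are below) =====
def Claim_equal_guess_dims_by_factoring : Prop := ∀ (decoded_size : Int) (bpp : Int), Dom_guess_dims_by_factoring decoded_size bpp → Spec_guess_dims_by_factoring decoded_size bpp (guess_dims_by_factoring decoded_size bpp)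

-- ===== LEMMAS AND PROOFS =====

-- A's pair-collection condition / B's second-scan condition, as a predicate on w
def pvQ2 (cap w : Int) : Bool :=
  (PySem.Int.mod cap w = 0) ∧ (8 ≤ PySem.Int.floordiv cap w ∧ PySem.Int.floordiv cap w ≤ 2048)

-- the band condition combined with the collection condition / B's first-scan condition
def pvQ1 (cap w : Int) : Bool :=
  (PySem.Int.mod cap w = 0) ∧ (40 ≤ PySem.Int.floordiv cap w ∧ PySem.Int.floordiv cap w ≤ 640)

def pvF (cap : Int) (w : Int) : Int × Int := (w, PySem.Int.floordiv cap w)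

lemma pvPairsA_eq (cap : Int) :
    pvPairsA cap = ((PySem.List.pyRange 16 1601 1).filter (pvQ2 cap)).map (pvF cap) := by
  unfold pvPairsA
  have hf : (fun (acc : List (Int × Int)) (w : Int) =>
      if PySem.Int.mod cap w = 0 then
        let h := PySem.Int.floordiv cap w
        if 8 ≤ h ∧ h ≤ 2048 then acc ++ [(w, h)] else acc
      else acc)
      = fun acc w => if pvQ2 cap w then acc ++ [pvF cap w] else acc := by
    funext acc w
    simp only [pvQ2, pvF, decide_eq_true_eq]
    split_ifs with h1 h2 h3 h3 <;> simp_all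
  rw [hf, PySem.List.foldl_append_if]
  simp

lemma band_eq (cap : Int) :
    (((PySem.List.pyRange 16 1601 1).filter (pvQ2 cap)).map (pvF cap)).filter
        (fun p => decide (160 ≤ p.1 ∧ p.1 ≤ 640 ∧ 40 ≤ p.2 ∧ p.2 ≤ 640))
      = ((PySem.List.pyRange 160 641 1).filter (pvQ1 cap)).map (pvF cap) := by
  rw [List.filter_map, List.filter_filter]
  rw [PySem.List.pyRange_one_append 16 160 1601 (by norm_num) (by norm_num),
      PySem.List.pyRange_one_append 160 641 1601 (by norm_num) (by norm_num)]
  rw [List.filter_append, List.filter_append]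
  have hmem : ∀ (a b : Int) (w : Int), w ∈ PySem.List.pyRange a b 1 → a ≤ w ∧ w < b := by
    intro a b w hw; exact PySem.List.mem_pyRange_one.mp hw
  have h1 : (PySem.List.pyRange 16 160 1).filter
      (fun a => ((fun p => decide (160 ≤ p.1 ∧ p.1 ≤ 640 ∧ 40 ≤ p.2 ∧ p.2 ≤ 640)) ∘ pvF cap) a && pvQ2 cap a) = [] := by
    rw [List.filter_eq_nil_iff]
    intro w hw
    have := (hmem _ _ _ hw).2
    simp only [Function.comp, pvF, Bool.and_eq_true, decide_eq_true_eq]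
    rintro ⟨⟨h160, -⟩, -⟩; omega
  have h3 : (PySem.List.pyRange 641 1601 1).filter
      (fun a => ((fun p => decide (160 ≤ p.1 ∧ p.1 ≤ 640 ∧ 40 ≤ p.2 ∧ p.2 ≤ 640)) ∘ pvF cap) a && pvQ2 cap a) = [] := by
    rw [List.filter_eq_nil_iff]
    intro w hw
    have := (hmem _ _ _ hw).1
    simp only [Function.comp, pvF, Bool.and_eq_true, decide_eq_true_eq]
    rintro ⟨⟨-, h640, -⟩, -⟩; omega
  rw [h1, h3]
  have h2 : (PySem.List.pyRange 160 641 1).filter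
      (fun a => ((fun p => decide (160 ≤ p.1 ∧ p.1 ≤ 640 ∧ 40 ≤ p.2 ∧ p.2 ≤ 640)) ∘ pvF cap) a && pvQ2 cap a)
      = (PySem.List.pyRange 160 641 1).filter (pvQ1 cap) := by
    apply List.filter_congr
    intro w hw
    have := hmem _ _ _ hw
    simp only [Function.comp, pvQ2, pvQ1, pvF]
    rw [Bool.eq_iff_iff]
    simp only [Bool.and_eq_true, decide_eq_true_eq]
    constructor
    · rintro ⟨⟨-, -, h40, h640h⟩, hm, -⟩; exact ⟨hm, by omega⟩
    · rintro ⟨hm, h40, h640h⟩; exact ⟨⟨by omega, by omega⟩, hm, by omega⟩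
  rw [h2]; simp

lemma pvFind?_eq_head_filter {α : Type} (p : α → Bool) (l : List α) :
    l.find? p = (l.filter p).head? := by
  induction l with
  | nil => rfl
  | cons x xs ih =>
    by_cases h : p x
    · rw [List.find?_cons_of_pos h, List.filter_cons_of_pos h]; rfl
    · simp only [Bool.not_eq_true] at h
      rw [List.find?_cons_of_neg (by simp [h]), List.filter_cons_of_neg (by simp [h]), ih]

lemma pvScanB_eq1 (cap : Int) (ws : List Int) :
    pvScanB cap 40 640 ws = ((ws.filter (pvQ1 cap)).head?).map (pvF cap) := by
  rw [← pvFind?_eq_head_filter]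
  induction ws with
  | nil => rfl
  | cons w ws ih =>
    by_cases h : pvQ1 cap w
    · simp only [pvQ1, decide_eq_true_eq] at h
      simp [pvScanB, List.find?, pvQ1, h, pvF]
    · simp only [pvQ1, decide_eq_true_eq] at h
      simp only [pvScanB, if_neg h, ih]
      rw [List.find?_cons_of_neg]
      simpa [pvQ1] using h

lemma pvScanB_eq2 (cap : Int) (ws : List Int) :
    pvScanB cap 8 2048 ws = ((ws.filter (pvQ2 cap)).head?).map (pvF cap) := by
  rw [← pvFind?_eq_head_filter]
  induction ws with
  | nil => rfl
  | cons w ws ih =>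
    by_cases h : pvQ2 cap w
    · simp only [pvQ2, decide_eq_true_eq] at h
      simp [pvScanB, List.find?, pvQ2, h, pvF]
    · simp only [pvQ2, decide_eq_true_eq] at h
      simp only [pvScanB, if_neg h, ih]
      rw [List.find?_cons_of_neg]
      simpa [pvQ2] using h

lemma pvInsertBy_front {α : Type} (before : α → α → Bool) (x : α) (ys : List α)
    (h : ∀ y ∈ ys, before x y = true) :
    PySem.List.insertBy before x ys = x :: ys := by
  cases ys with
  | nil => rfl
  | cons y ys => simp [PySem.List.insertBy, h y (by simp)]

lemma pvFoldl_insertBy_rev {α : Type} (k1 k2 : α → Int) (xs acc : List α)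
    (hacc : ∀ x ∈ xs, ∀ y ∈ acc, k1 x < k1 y)
    (hxs : xs.Pairwise (fun a b => k1 b < k1 a)) :
    xs.foldl (fun acc x => PySem.List.insertBy
        (fun a b => decide (k1 a < k1 b) || (!decide (k1 b < k1 a) && decide (k2 a < k2 b))) x acc) acc
      = xs.reverse ++ acc := by
  induction xs generalizing acc with
  | nil => rfl
  | cons x xs ih =>
    have hpw := (List.pairwise_cons.mp hxs)
    simp only [List.foldl_cons]
    rw [pvInsertBy_front]
    · rw [ih (x :: acc) ?_ hpw.2]
      · simp
      · intro z hz y hy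
        rcases List.mem_cons.mp hy with rfl | hy
        · exact hpw.1 z hz
        · exact lt_trans (hpw.1 z hz) (hacc x (by simp) y hy)
    · intro y hy
      have := hacc x (by simp) y hy
      simp [this]

lemma pvSorted2_reverse_of_decr {α : Type} (k1 k2 : α → Int) (xs : List α)
    (h : xs.Pairwise (fun a b => k1 b < k1 a)) :
    PySem.List.sorted2 xs k1 k2 = xs.reverse := by
  have := pvFoldl_insertBy_rev k1 k2 xs [] (by intro x hx y hy; simp at hy) h
  simpa [PySem.List.sorted2] using this

-- first components of a filtered-range pair list strictly increase,
-- so the sort key (-w, h) strictly decreases along it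
lemma pvDecr (cap a b : Int) (Q : Int → Bool) :
    (((PySem.List.pyRange a b 1).filter Q).map (pvF cap)).Pairwise
      (fun p q : Int × Int => -q.1 < -p.1) := by
  rw [List.pairwise_map]
  have h := (PySem.List.pairwise_lt_pyRange_one a b).filter Q
  exact h.imp (by intro x y hxy; simp only [pvF]; omega)

-- the two branch cascades agree for any cap and any shared fallback value
lemma pvCore_eq (cap : Int) (fb : Int × Int) :
    (let pairs := pvPairsA cap
     let band := pairs.filter (fun p => decide (160 ≤ p.1 ∧ p.1 ≤ 640 ∧ 40 ≤ p.2 ∧ p.2 ≤ 640))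
     if band ≠ [] then
       (PySem.List.sorted2 band (fun p => -p.1) (fun p => p.2)).headD (0, 0)
     else if pairs ≠ [] then
       (PySem.List.sorted2 pairs (fun p => -p.1) (fun p => p.2)).headD (0, 0)
     else fb)
    = (match pvScanB cap 40 640 (PySem.List.pyRange 640 159 (-1)) with
       | some p => p
       | none =>
         match pvScanB cap 8 2048 (PySem.List.pyRange 1600 15 (-1)) with
         | some p => p
         | none => fb) := by
  rw [pvScanB_eq1, pvScanB_eq2,
      PySem.List.pyRange_neg_one_eq_reverse 640 159,
      PySem.List.pyRange_neg_one_eq_reverse 1600 15,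
      show (159:Int)+1 = 160 from by norm_num, show (640:Int)+1 = 641 from by norm_num,
      show (15:Int)+1 = 16 from by norm_num, show (1600:Int)+1 = 1601 from by norm_num,
      List.filter_reverse, List.filter_reverse]
  simp only [pvPairsA_eq, band_eq]
  rw [pvSorted2_reverse_of_decr _ _ _ (pvDecr cap 160 641 (pvQ1 cap)),
      pvSorted2_reverse_of_decr _ _ _ (pvDecr cap 16 1601 (pvQ2 cap))]
  rw [← List.map_reverse, ← List.map_reverse]
  cases h1 : ((PySem.List.pyRange 160 641 1).filter (pvQ1 cap)).reverse with
  | cons w t =>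
    have hne : ((PySem.List.pyRange 160 641 1).filter (pvQ1 cap)).map (pvF cap) ≠ [] := by
      intro hmap
      rw [List.map_eq_nil_iff.mp hmap] at h1
      simp at h1
    rw [if_pos hne]
    rfl
  | nil =>
    have hmapnil : ((PySem.List.pyRange 160 641 1).filter (pvQ1 cap)).map (pvF cap) = [] := by
      rw [List.reverse_eq_nil_iff.mp h1]; rfl
    rw [if_neg (not_not_intro hmapnil)]
    cases h2 : ((PySem.List.pyRange 16 1601 1).filter (pvQ2 cap)).reverse with
    | cons w t =>
      have hne2 : ((PySem.List.pyRange 16 1601 1).filter (pvQ2 cap)).map (pvF cap) ≠ [] := by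
        intro hmap
        rw [List.map_eq_nil_iff.mp hmap] at h2
        simp at h2
      rw [if_pos hne2]
      rfl
    | nil =>
      have hmapnil2 : ((PySem.List.pyRange 16 1601 1).filter (pvQ2 cap)).map (pvF cap) = [] := by
        rw [List.reverse_eq_nil_iff.mp h2]; rfl
      rw [if_neg (not_not_intro hmapnil2)]
      rfl

-- ===== VERDICT (by name: the statement is the Claim_ definition above) =====
theorem guess_dims_by_factoring_spec : Claim_equal_guess_dims_by_factoring := by
  intro decoded_size bpp _
  unfold Spec_guess_dims_by_factoring
  simp only [guess_dims_by_factoring, guess_dims_by_factoring_alt]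
  by_cases hcap : PySem.Int.floordiv decoded_size (max 1 (PySem.Int.floordiv bpp 8)) ≤ 0
  · rw [if_pos hcap, if_pos hcap]
  · rw [if_neg hcap, if_neg hcap]
    exact pvCore_eq _ _
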